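-- pv_equiv track=rewrite | github.com/CMU15-112/lecture_demos_qatar | Week2/Lect1/CT2.py | ct2
-- ===== SOURCE A (Python) =====
-- def ct2(s):
--     result = ""
--     i = 0
--     for c in s:
--         if c.isdigit():
--             result += s[int(c)]
--         elif c == c.upper():
--             i += 3
--         else:
--             result += s[i % 2]
--         i += 1
--     return result
-- ===== SOURCE B (Python) =====
-- def ct2(s):
--     # pass 1: prefix counts -- extra[k] = #{j < k : not s[j].isdigit() and s[j] == s[j].upper()}
--     extra = [0]
--     for c in s:
--         extra.append(extra[-1] + (0 if c.isdigit() else 1 if c == c.upper() else 0))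
--     # pass 2: map each position; the counter i of the original equals k + 3*extra[k]
--     out = []
--     for k, (c, e) in enumerate(zip(s, extra)):
--         if c.isdigit():
--             out.append(s[int(c)])
--         elif c != c.upper():
--             out.append(s[(k + 3 * e) % 2])
--     return "".join(out)
-- ===== Notes on version B (the rewrite author's own statement) =====
-- stated objective: alternative
-- what changed: Replaces the single stateful sweep threading a mutable counter i by two passes: first a prefix table of the counts of non-digit upper-equal characters, then a stateless mapping pass that recovers i at position k as k + 3*extra[k].
import Mathlib
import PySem

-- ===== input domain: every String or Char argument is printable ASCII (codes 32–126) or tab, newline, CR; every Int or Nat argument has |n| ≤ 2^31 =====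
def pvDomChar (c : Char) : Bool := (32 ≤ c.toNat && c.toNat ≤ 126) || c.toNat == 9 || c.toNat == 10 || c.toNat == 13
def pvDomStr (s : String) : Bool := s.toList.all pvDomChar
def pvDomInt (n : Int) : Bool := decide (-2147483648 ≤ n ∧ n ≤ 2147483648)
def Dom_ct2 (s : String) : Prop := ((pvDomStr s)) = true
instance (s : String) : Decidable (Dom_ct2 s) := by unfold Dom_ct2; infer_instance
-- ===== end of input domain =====

-- B replaces A's single sweep with a mutable counter by a prefix-count table plus a stateless mapping pass (alternative decomposition, same cost).

-- ===== PORT A =====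
-- A's loop: result += pieces, counter i; s[int(c)] can raise IndexError (excluded by Pre_),
-- ported as pyGetD (the default is unreachable under Pre_); int(c) for a digit char is c.toNat - 48.
def ct2A_go (s : List Char) : List Char → Int → List Char → List Char
  | [], _, res => res
  | c :: rest, i, res =>
    if PySem.Chars.isdigit c then
      ct2A_go s rest (i + 1) (res ++ [PySem.List.pyGetD s ((c.toNat : Int) - 48) ' '])
    else if c == PySem.Chars.upperChar c then
      ct2A_go s rest (i + 3 + 1) res
    else
      ct2A_go s rest (i + 1) (res ++ [PySem.List.pyGetD s (PySem.Int.mod i 2) ' '])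

def ct2 (s : String) : String := String.mk (ct2A_go s.toList s.toList 0 [])

-- ===== PORT B =====
-- pass 1 of Source B: the prefix counts appended after the initial 0 (extra[1..n])
def ct2B_extra : List Char → Int → List Int
  | [], _ => []
  | c :: rest, e =>
    let e' := e + (if PySem.Chars.isdigit c then 0 else if c == PySem.Chars.upperChar c then 1 else 0)
    e' :: ct2B_extra rest e'

-- pass 2 of Source B: enumerate(zip(s, extra)) with the three branches
def ct2B_go (s : List Char) : List (Char × Int) → Int → List Char
  | [], _ => []
  | (c, e) :: rest, k =>
    if PySem.Chars.isdigit c then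
      PySem.List.pyGetD s ((c.toNat : Int) - 48) ' ' :: ct2B_go s rest (k + 1)
    else if c != PySem.Chars.upperChar c then
      PySem.List.pyGetD s (PySem.Int.mod (k + 3 * e) 2) ' ' :: ct2B_go s rest (k + 1)
    else
      ct2B_go s rest (k + 1)

def ct2_alt (s : String) : String :=
  String.mk (ct2B_go s.toList (s.toList.zip (0 :: ct2B_extra s.toList 0)) 0)

-- ===== PRECONDITION & SPEC =====
-- Pre_ excludes exactly the inputs where A raises IndexError: a digit character whose value is ≥ len(s).
def Pre_ct2 (s : String) : Prop :=
  (s.toList.all (fun c => !(PySem.Chars.isdigit c) || decide (c.toNat - 48 < s.toList.length))) = true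
instance (s : String) : Decidable (Pre_ct2 s) := by unfold Pre_ct2; infer_instance
def pvWitness_ct2 : String := "aB2c"
def Spec_ct2 (s : String) (out : String) : Prop := out = ct2_alt s
instance (s : String) (out : String) : Decidable (Spec_ct2 s out) := by unfold Spec_ct2; infer_instance

-- ===== CLAIM (what is proved, stated in full; the proofs are below) =====
def Claim_equal_ct2 : Prop := ∀ (s : String), Dom_ct2 s → Pre_ct2 s → Spec_ct2 s (ct2 s)

-- ===== LEMMAS AND PROOFS =====

-- proof helper: the pairs (s[k], extra[k]) of B's second pass, generated directly
def pairsFrom : List Char → Int → List (Char × Int)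
  | [], _ => []
  | c :: rest, e =>
    (c, e) :: pairsFrom rest (e + (if PySem.Chars.isdigit c then 0 else if c == PySem.Chars.upperChar c then 1 else 0))

theorem zip_extra_eq_pairsFrom (t : List Char) (e : Int) :
    t.zip (e :: ct2B_extra t e) = pairsFrom t e := by
  induction t generalizing e with
  | nil => rfl
  | cons c rest ih => simp [ct2B_extra, pairsFrom, ih]

-- loop invariant: A's counter i at position k equals k + 3 * extra[k]
theorem go_eq (s t : List Char) (k e : Int) (res : List Char) :
    ct2A_go s t (k + 3 * e) res = res ++ ct2B_go s (pairsFrom t e) k := by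
  induction t generalizing k e res with
  | nil => simp [ct2A_go, ct2B_go, pairsFrom]
  | cons c rest ih =>
    by_cases hd : PySem.Chars.isdigit c = true
    · simp only [ct2A_go, ct2B_go, pairsFrom, hd, if_true]
      rw [show k + 3 * e + 1 = (k + 1) + 3 * e by ring, ih]
      simp
    · by_cases hu : c = PySem.Chars.upperChar c
      · have hb : (c == PySem.Chars.upperChar c) = true := beq_iff_eq.mpr hu
        simp only [ct2A_go, ct2B_go, pairsFrom, hd, hb, if_true, Bool.false_eq_true]
        rw [show k + 3 * e + 3 + 1 = (k + 1) + 3 * (e + 1) by ring, ih]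
        simp [bne, hb]
      · have hb : (c == PySem.Chars.upperChar c) = false := beq_eq_false_iff_ne.mpr hu
        simp only [ct2A_go, ct2B_go, pairsFrom, hd, hb, if_false, Bool.false_eq_true]
        rw [show k + 3 * e + 1 = (k + 1) + 3 * e by ring, ih]
        simp [bne, hb]

-- ===== VERDICT (by name: the statement is the Claim_ definition above) =====
theorem ct2_spec : Claim_equal_ct2 := by
  intro s _ _
  unfold Spec_ct2 ct2 ct2_alt
  rw [zip_extra_eq_pairsFrom]
  have h := go_eq s.toList s.toList 0 0 []
  norm_num at h
  exact congrArg String.mk h
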